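-- pv_equiv track=rewrite | github.com/N384R/zebra | Fermionic_Operator.py | sign_sort
-- ===== SOURCE A (Python) =====
-- def sign_sort(operator):
--     sign = False
--     for i in range(1, len(operator)):
--         if operator[i] == '-':
--             if sign is True:
--                 operator[i] = '+'
--                 sign = False
--             elif sign is False:
--                 sign = True
--     return operator
-- ===== SOURCE B (Python) =====
-- def sign_sort(operator):
--     minus_idx = [i for i in range(1, len(operator)) if operator[i] == '-']
--     for k in range(1, len(minus_idx), 2):
--         operator[minus_idx[k]] = '+'
--     return operator
-- ===== Notes on version B (the rewrite author's own statement) =====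
-- stated objective: alternative
-- what changed: A's single interleaved loop with a boolean sign toggle is replaced by two passes: first collect the positions of every '-' at indices >= 1, then rewrite every second collected position (the 2nd, 4th, ...) to '+'.
import Mathlib
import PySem

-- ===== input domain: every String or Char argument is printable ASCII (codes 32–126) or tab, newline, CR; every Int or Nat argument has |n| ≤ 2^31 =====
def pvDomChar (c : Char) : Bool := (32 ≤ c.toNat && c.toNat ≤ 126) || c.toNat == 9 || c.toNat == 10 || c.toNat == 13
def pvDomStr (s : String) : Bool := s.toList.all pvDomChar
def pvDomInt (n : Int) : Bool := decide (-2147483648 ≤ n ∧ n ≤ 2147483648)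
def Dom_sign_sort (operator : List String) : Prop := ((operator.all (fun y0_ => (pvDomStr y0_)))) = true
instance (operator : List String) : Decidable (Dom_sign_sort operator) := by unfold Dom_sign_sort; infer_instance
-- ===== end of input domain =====

-- B replaces A's stateful sign-toggling loop by two passes (collect minus positions, then
-- rewrite every second one to '+'): an alternative decomposition, same linear cost.
-- Both Pythons mutate `operator` in place identically; the theorems are about the return value.

-- ===== PORT A =====
-- the for-loop of A: state is (operator, sign)
def signSortLoop (idxs : List Int) (ops : List String) (sign : Bool) : List String × Bool :=
  match idxs with
  | [] => (ops, sign)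
  | i :: rest =>
    if PySem.List.pyGetD ops i "" = "-" then
      if sign = true then
        signSortLoop rest (PySem.List.pySetD ops i "+") false
      else
        signSortLoop rest ops true
    else
      signSortLoop rest ops sign

def sign_sort (operator : List String) : List String :=
  (signSortLoop (PySem.List.pyRange 1 (operator.length : Int) 1) operator false).1

-- ===== PORT B =====
def sign_sort_alt (operator : List String) : List String :=
  let minusIdx := (PySem.List.pyRange 1 (operator.length : Int) 1).filter
      (fun i => PySem.List.pyGetD operator i "" == "-")
  (PySem.List.pyRange 1 (minusIdx.length : Int) 2).foldl
      (fun ops k => PySem.List.pySetD ops (PySem.List.pyGetD minusIdx k 0) "+") operator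

-- ===== PRECONDITION & SPEC =====
def Spec_sign_sort (operator : List String) (out : List String) : Prop := out = sign_sort_alt operator
instance (operator : List String) (out : List String) : Decidable (Spec_sign_sort operator out) := by unfold Spec_sign_sort; infer_instance

-- ===== CLAIM (what is proved, stated in full; the proofs are below) =====
def Claim_equal_sign_sort : Prop := ∀ (operator : List String), Dom_sign_sort operator → Spec_sign_sort operator (sign_sort operator)

-- ===== LEMMAS AND PROOFS =====

-- ghost: the elements of xs at even positions (first arg true) / odd positions (first arg false)
def dropAlt {α : Type} : Bool → List α → List α
  | _, [] => []
  | true, x :: xs => x :: dropAlt false xs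
  | false, _ :: xs => dropAlt true xs

lemma pyRange_two_nil {a b : Int} (h : b ≤ a) : PySem.List.pyRange a b 2 = [] := by
  rw [PySem.List.pyRange_of_pos a b (by norm_num)]
  simp [if_neg (not_lt.mpr h)]

lemma pyRange_two_cons {a b : Int} (h : a < b) :
    PySem.List.pyRange a b 2 = a :: PySem.List.pyRange (a + 2) b 2 := by
  rw [PySem.List.pyRange_of_pos a b (by norm_num),
      PySem.List.pyRange_of_pos (a + 2) b (by norm_num)]
  rw [if_pos h]
  have hn : ((b - a + 2 - 1) / 2).toNat =
      (if a + 2 < b then ((b - (a + 2) + 2 - 1) / 2).toNat else 0) + 1 := by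
    split_ifs with h2 <;> omega
  rw [hn, List.range_succ_eq_map, List.map_cons, List.map_map]
  congr 1
  · norm_num
  · refine List.map_congr_left ?_
    intro k _
    simp only [Function.comp_apply, Nat.succ_eq_add_one]
    push_cast
    ring

lemma pyRange_two_shift (a b : Int) :
    PySem.List.pyRange (a + 1) (b + 1) 2 = (PySem.List.pyRange a b 2).map (· + 1) := by
  rw [PySem.List.pyRange_of_pos a b (by norm_num),
      PySem.List.pyRange_of_pos (a + 1) (b + 1) (by norm_num), List.map_map]
  by_cases h : a < b
  · rw [if_pos h, if_pos (show a + 1 < b + 1 by omega),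
        show b + 1 - (a + 1) + 2 - 1 = b - a + 2 - 1 by ring]
    refine List.map_congr_left ?_
    intro k _
    simp only [Function.comp_apply]
    ring
  · rw [if_neg h, if_neg (show ¬ a + 1 < b + 1 by omega)]
    simp

-- indexing a cons at i+1 is indexing the tail at i
lemma pyGetD_cons_succ {α : Type} (x : α) (xs : List α) (i : Int) (d : α)
    (h0 : 0 ≤ i) (h1 : i < (xs.length : Int)) :
    PySem.List.pyGetD (x :: xs) (i + 1) d = PySem.List.pyGetD xs i d := by
  rw [PySem.List.pyGetD_eq_getElem _ _ (by omega) (by simp; omega),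
      PySem.List.pyGetD_eq_getElem _ _ h0 h1]
  have : (i + 1).toNat = i.toNat + 1 := by omega
  simp [this]

-- reading xs at indices 0,2,4,… (resp. 1,3,5,…) yields dropAlt true xs (resp. dropAlt false xs)
lemma map_get_pyRange_two {α : Type} (xs : List α) (d : α) :
    (PySem.List.pyRange 0 (xs.length : Int) 2).map (fun k => PySem.List.pyGetD xs k d)
      = dropAlt true xs ∧
    (PySem.List.pyRange 1 (xs.length : Int) 2).map (fun k => PySem.List.pyGetD xs k d)
      = dropAlt false xs := by
  induction xs with
  | nil => simp [pyRange_two_nil, dropAlt]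
  | cons x t ih =>
    have hlen : ((x :: t).length : Int) = (t.length : Int) + 1 := by
      simp
    have hs0 := pyRange_two_shift 0 (t.length : Int)
    norm_num at hs0
    have hs1 := pyRange_two_shift 1 (t.length : Int)
    norm_num at hs1
    have hmap1 : List.map ((fun k => PySem.List.pyGetD (x :: t) k d) ∘ (· + 1))
          (PySem.List.pyRange 1 (t.length : Int) 2)
        = List.map (fun i => PySem.List.pyGetD t i d)
          (PySem.List.pyRange 1 (t.length : Int) 2) := by
      refine List.map_congr_left ?_
      intro i hi
      rw [PySem.List.mem_pyRange_iff_of_pos (by norm_num)] at hi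
      simp only [Function.comp_apply]
      exact pyGetD_cons_succ x t i d (by omega) hi.2.1
    have hmap0 : List.map ((fun k => PySem.List.pyGetD (x :: t) k d) ∘ (· + 1))
          (PySem.List.pyRange 0 (t.length : Int) 2)
        = List.map (fun i => PySem.List.pyGetD t i d)
          (PySem.List.pyRange 0 (t.length : Int) 2) := by
      refine List.map_congr_left ?_
      intro i hi
      rw [PySem.List.mem_pyRange_iff_of_pos (by norm_num)] at hi
      simp only [Function.comp_apply]
      exact pyGetD_cons_succ x t i d hi.1 hi.2.1
    constructor
    · rw [hlen, pyRange_two_cons (show (0 : Int) < (t.length : Int) + 1 by omega),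
          show (0 : Int) + 2 = 2 by norm_num, hs1, List.map_cons, List.map_map, hmap1, ih.2]
      simp [dropAlt, PySem.List.pyGetD_zero_cons]
    · rw [hlen, hs0, List.map_map, hmap0, ih.1]
      simp [dropAlt]

-- A's loop, started with sign s, rewrites every second not-yet-consumed minus position to "+"
lemma signSortLoop_eq (idxs : List Int) :
    ∀ (ops : List String) (s : Bool),
    (∀ i ∈ idxs, 0 ≤ i ∧ i < (ops.length : Int)) → idxs.Pairwise (· < ·) →
    (signSortLoop idxs ops s).1
      = (dropAlt s (idxs.filter (fun i => PySem.List.pyGetD ops i "" == "-"))).foldl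
          (fun o j => PySem.List.pySetD o j "+") ops := by
  induction idxs with
  | nil => intro ops s _ _; simp [signSortLoop, dropAlt]
  | cons i rest ih =>
    intro ops s hmem hpw
    have hi := hmem i (List.mem_cons_self)
    have hpw' := (List.pairwise_cons.mp hpw)
    by_cases hminus : PySem.List.pyGetD ops i "" = "-"
    · cases s with
      | false =>
        simp only [signSortLoop, hminus, List.filter_cons, beq_self_eq_true, if_true,
          Bool.false_eq_true, if_false]
        rw [ih ops true (fun j hj => hmem j (List.mem_cons_of_mem _ hj)) hpw'.2]
        simp [dropAlt]
      | true =>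
        simp only [signSortLoop, hminus, List.filter_cons, beq_self_eq_true, if_true]
        rw [ih (PySem.List.pySetD ops i "+") false
            (fun j hj => by
              have := hmem j (List.mem_cons_of_mem _ hj)
              rw [PySem.List.length_pySetD]
              exact this)
            hpw'.2]
        have hfilter : rest.filter
              (fun j => PySem.List.pyGetD (PySem.List.pySetD ops i "+") j "" == "-")
            = rest.filter (fun j => PySem.List.pyGetD ops j "" == "-") := by
          apply List.filter_congr
          intro j hj
          have hij : i < j := hpw'.1 j hj
          have hjb := hmem j (List.mem_cons_of_mem _ hj)
          rw [PySem.List.pySetD_of_nonneg _ _ hi.1,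
              PySem.List.pyGetD_eq_getElem _ _ (by omega) (by simp; omega),
              PySem.List.pyGetD_eq_getElem _ _ hjb.1 hjb.2]
          rw [List.getElem_set_ne (by omega)]
        rw [hfilter]
        simp [dropAlt]
    · simp only [signSortLoop, List.filter_cons,
        show (PySem.List.pyGetD ops i "" == "-") = false by simp [hminus], if_neg hminus,
        Bool.false_eq_true, if_false]
      exact ih ops s (fun j hj => hmem j (List.mem_cons_of_mem _ hj)) hpw'.2

-- B unfolded: the stride-2 rewrite equals a fold over dropAlt false of the minus positions
lemma sign_sort_alt_eq (operator : List String) :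
    sign_sort_alt operator
      = (dropAlt false ((PySem.List.pyRange 1 (operator.length : Int) 1).filter
            (fun i => PySem.List.pyGetD operator i "" == "-"))).foldl
          (fun o j => PySem.List.pySetD o j "+") operator := by
  simp only [sign_sort_alt]
  rw [← (map_get_pyRange_two ((PySem.List.pyRange 1 (operator.length : Int) 1).filter
        (fun i => PySem.List.pyGetD operator i "" == "-")) (0 : Int)).2,
      List.foldl_map]

-- ===== VERDICT (by name: the statement is the Claim_ definition above) =====
theorem sign_sort_spec : Claim_equal_sign_sort := by
  intro operator _
  unfold Spec_sign_sort
  rw [sign_sort_alt_eq]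
  unfold sign_sort
  rw [signSortLoop_eq _ operator false
      (fun i hi => by rw [PySem.List.mem_pyRange_one] at hi; exact ⟨by omega, hi.2⟩)
      (PySem.List.pairwise_lt_pyRange_one 1 (operator.length : Int))]
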